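-- pv_equiv track=rewrite | github.com/c3811yyds/Graduation_project | backend/sensitive_filter.py | _contains_ascii_token
-- ===== SOURCE A (Python) =====
-- def _is_ascii_word_char(ch: str) -> bool:
--     return ch.isascii() and (ch.isalnum() or ch == "_")
--
-- def _contains_ascii_token(text: str, token: str) -> bool:
--     start = 0
--     token_len = len(token)
--     text_len = len(text)
--     while True:
--         idx = text.find(token, start)
--         if idx < 0:
--             return False
--         left_ok = idx == 0 or not _is_ascii_word_char(text[idx - 1])
--         right_idx = idx + token_len
--         right_ok = right_idx == text_len or not _is_ascii_word_char(text[right_idx])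
--         if left_ok and right_ok:
--             return True
--         start = idx + 1
-- ===== SOURCE B (Python) =====
-- def _is_word(ch: str) -> bool:
--     return ch.isascii() and (ch.isalnum() or ch == "_")
--
-- def _contains_ascii_token(text: str, token: str) -> bool:
--     n, m = len(text), len(token)
--     return any(
--         text[i:i + m] == token
--         and (i == 0 or not _is_word(text[i - 1]))
--         and (i + m == n or not _is_word(text[i + m]))
--         for i in range(n - m + 1)
--     )
-- ===== Notes on version B (the rewrite author's own statement) =====
-- stated objective: simpler
-- what changed: A's stateful find-and-retry while-loop (cursor advanced past each rejected hit) is replaced by a single any(...) comprehension that tests every candidate start position directly with a slice comparison and the two boundary checks.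
import Mathlib
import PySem

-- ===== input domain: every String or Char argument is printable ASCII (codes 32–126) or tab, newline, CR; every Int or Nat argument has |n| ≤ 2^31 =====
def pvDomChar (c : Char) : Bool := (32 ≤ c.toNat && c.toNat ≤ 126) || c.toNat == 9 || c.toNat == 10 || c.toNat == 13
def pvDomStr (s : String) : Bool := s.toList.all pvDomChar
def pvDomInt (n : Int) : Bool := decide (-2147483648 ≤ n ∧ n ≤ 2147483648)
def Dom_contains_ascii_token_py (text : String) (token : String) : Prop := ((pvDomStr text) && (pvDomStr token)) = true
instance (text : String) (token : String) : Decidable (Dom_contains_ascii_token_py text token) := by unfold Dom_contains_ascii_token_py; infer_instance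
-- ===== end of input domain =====

-- B replaces A's find-and-retry while-loop by a single any(...) over every candidate
-- start position (simpler: one comprehension, no cursor state); same return value.

-- ===== PORT A =====
-- _is_ascii_word_char: ch.isascii() and (ch.isalnum() or ch == "_")
def pvIsWordA (ch : Char) : Bool :=
  decide (ch.toNat ≤ 127) && (PySem.Chars.isalnum ch || ch == '_')

-- the 'while True' loop of A, fuel-bounded (start grows each retry; fuel len+1 suffices)
def pvALoop (cs ts : List Char) : Nat → Nat → Bool
  | _, 0 => false
  | start, fuel + 1 =>
    let idx : Int := PySem.Chars.findFrom cs ts (start : Int) none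
    if idx < 0 then false
    else
      -- idx ≥ 0 on this branch, so .toNat is exact
      let i : Nat := idx.toNat
      -- text[idx-1] / text[right_idx]: guarded in range by the preceding disjunct
      let leftOk := (i == 0) || !(pvIsWordA (cs.getD (i - 1) ' '))
      let rightIdx := i + ts.length
      let rightOk := (rightIdx == cs.length) || !(pvIsWordA (cs.getD rightIdx ' '))
      if leftOk && rightOk then true else pvALoop cs ts (i + 1) fuel

def contains_ascii_token_py (text : String) (token : String) : Bool :=
  pvALoop text.toList token.toList 0 (text.toList.length + 1)

-- ===== PORT B =====
def pvIsWordB (ch : Char) : Bool :=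
  decide (ch.toNat ≤ 127) && (PySem.Chars.isalnum ch || ch == '_')

def contains_ascii_token_py_alt (text : String) (token : String) : Bool :=
  let cs := text.toList
  let ts := token.toList
  let n := cs.length
  let m := ts.length
  (PySem.List.pyRange 0 ((n : Int) - (m : Int) + 1) 1).any fun i =>
    (PySem.List.slice cs (some i) (some (i + (m : Int))) == ts)
    && ((i == 0) || !(pvIsWordB (PySem.List.pyGetD cs (i - 1) ' ')))
    && ((i + (m : Int) == (n : Int)) || !(pvIsWordB (PySem.List.pyGetD cs (i + (m : Int)) ' ')))

-- ===== PRECONDITION & SPEC =====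
def Spec_contains_ascii_token_py (text : String) (token : String) (out : Bool) : Prop := out = contains_ascii_token_py_alt text token
instance (text : String) (token : String) (out : Bool) : Decidable (Spec_contains_ascii_token_py text token out) := by unfold Spec_contains_ascii_token_py; infer_instance

-- ===== CLAIM (what is proved, stated in full; the proofs are below) =====
def Claim_equal_contains_ascii_token_py : Prop := ∀ (text : String) (token : String), Dom_contains_ascii_token_py text token → Spec_contains_ascii_token_py text token (contains_ascii_token_py text token)

-- ===== LEMMAS AND PROOFS =====

-- "token occurs at i with non-word (or edge) neighbours" — shared characterisation
def pvGood (cs ts : List Char) (i : Nat) : Bool :=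
  decide (ts <+: cs.drop i)
  && ((i == 0) || !(pvIsWordA (cs.getD (i - 1) ' ')))
  && ((i + ts.length == cs.length) || !(pvIsWordA (cs.getD (i + ts.length) ' ')))

lemma pvIsWordB_eq : pvIsWordB = pvIsWordA := rfl

-- CPython's quirk: find(sub, start) with start past the end is -1 even for sub = ''
lemma pvFindFrom_gt (cs ts : List Char) (k : Nat) (h : cs.length < k) :
    PySem.Chars.findFrom cs ts (k : Int) none = -1 := by
  have hk : ¬ ((k : Int) < 0) := by omega
  simp [PySem.Chars.findFrom, hk]
  intro p
  exact absurd p (by omega)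

lemma pvGood_bound {cs ts : List Char} {i : Nat} (h : pvGood cs ts i = true)
    (hi : i ≤ cs.length) : i + ts.length ≤ cs.length := by
  have hp : ts <+: cs.drop i := by
    simp only [pvGood, Bool.and_eq_true, decide_eq_true_eq] at h
    exact h.1.1
  have := hp.length_le
  simp only [List.length_drop] at this
  omega

lemma pvALoop_sound (cs ts : List Char) :
    ∀ fuel start, pvALoop cs ts start fuel = true →
      ∃ i, start ≤ i ∧ i ≤ cs.length ∧ pvGood cs ts i = true := by
  intro fuel
  induction fuel with
  | zero => intro start h; simp [pvALoop] at h
  | succ fuel ih =>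
    intro start h
    by_cases hs : start ≤ cs.length
    · simp only [pvALoop] at h
      by_cases hneg : PySem.Chars.findFrom cs ts (start : Int) none < 0
      · rw [if_pos hneg] at h; exact absurd h (by simp)
      · have hne : PySem.Chars.findFrom cs ts (start : Int) none ≠ -1 := by omega
        obtain ⟨h1, h2, h3⟩ := PySem.Chars.findFrom_natCast_spec cs ts start hs hne
        have hjn : (PySem.Chars.findFrom cs ts (start : Int) none).toNat ≤ cs.length := by
          have hrw := PySem.Chars.findFrom_natCast cs ts start hs
          have hfl := PySem.Chars.find_le_length (List.drop start cs) ts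
          simp only [List.length_drop] at hfl
          rw [hrw] at hneg ⊢
          by_cases hdd : PySem.Chars.find (List.drop start cs) ts = -1
          · rw [if_pos hdd] at hneg; omega
          · rw [if_neg hdd] at hneg ⊢; omega
        rw [if_neg hneg] at h
        set j := (PySem.Chars.findFrom cs ts (start : Int) none).toNat with hj
        by_cases htest : (((j == 0) || !(pvIsWordA (cs.getD (j - 1) ' ')))
            && ((j + ts.length == cs.length) || !(pvIsWordA (cs.getD (j + ts.length) ' ')))) = true
        · refine ⟨j, by omega, hjn, ?_⟩
          simp only [Bool.and_eq_true] at htest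
          simp only [pvGood, Bool.and_eq_true, decide_eq_true_eq]
          exact ⟨⟨h2, htest.1⟩, htest.2⟩
        · rw [if_neg htest] at h
          obtain ⟨i, hi1, hi2, hi3⟩ := ih (j + 1) h
          exact ⟨i, by omega, hi2, hi3⟩
    · simp only [pvALoop] at h
      rw [pvFindFrom_gt cs ts start (by omega)] at h
      exact absurd h (by simp)

lemma pvALoop_complete (cs ts : List Char) :
    ∀ fuel start i, start ≤ i → i ≤ cs.length → pvGood cs ts i = true →
      cs.length + 1 ≤ start + fuel → pvALoop cs ts start fuel = true := by
  intro fuel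
  induction fuel with
  | zero => intro start i h1 h2 _ h4; omega
  | succ fuel ih =>
    intro start i hsi hin hgood hfuel
    have hs : start ≤ cs.length := le_trans hsi hin
    have hp : ts <+: cs.drop i := by
      simp only [pvGood, Bool.and_eq_true, decide_eq_true_eq] at hgood
      exact hgood.1.1
    have hocc : ts <:+: List.drop start cs := by
      have hp' : ts <+: (List.drop start cs).drop (i - start) := by
        rw [List.drop_drop, show start + (i - start) = i by omega]
        exact hp
      exact hp'.isInfix.trans (List.drop_suffix _ _).isInfix
    have hne : PySem.Chars.findFrom cs ts (start : Int) none ≠ -1 := by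
      rw [ne_eq, PySem.Chars.findFrom_natCast_eq_neg_one_iff cs ts start hs]
      simpa using hocc
    obtain ⟨h1, h2, h3⟩ := PySem.Chars.findFrom_natCast_spec cs ts start hs hne
    have hneg : ¬ (PySem.Chars.findFrom cs ts (start : Int) none < 0) := by omega
    have hji : (PySem.Chars.findFrom cs ts (start : Int) none).toNat ≤ i := by
      by_contra hlt
      exact h3 i hsi (by omega) hp
    simp only [pvALoop]
    rw [if_neg hneg]
    set j := (PySem.Chars.findFrom cs ts (start : Int) none).toNat with hj
    by_cases htest : (((j == 0) || !(pvIsWordA (cs.getD (j - 1) ' ')))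
        && ((j + ts.length == cs.length) || !(pvIsWordA (cs.getD (j + ts.length) ' ')))) = true
    · rw [if_pos htest]
    · rw [if_neg htest]
      have hjne : j ≠ i := by
        intro he
        apply htest
        simp only [pvGood, Bool.and_eq_true, decide_eq_true_eq] at hgood
        rw [he]
        simp only [Bool.and_eq_true]
        exact ⟨hgood.1.2, hgood.2⟩
      exact ih (j + 1) i (by omega) hin hgood (by omega)

lemma pvA_iff (text token : String) :
    contains_ascii_token_py text token = true ↔
      ∃ i, i ≤ text.toList.length ∧ pvGood text.toList token.toList i = true := by
  unfold contains_ascii_token_py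
  constructor
  · intro h
    obtain ⟨i, _, hi2, hi3⟩ := pvALoop_sound _ _ _ _ h
    exact ⟨i, hi2, hi3⟩
  · rintro ⟨i, hi1, hi2⟩
    exact pvALoop_complete _ _ _ 0 i (Nat.zero_le i) hi1 hi2 (by omega)

-- B's per-position test, at a nonnegative index, is exactly pvGood
lemma pvGoodB_eq (cs ts : List Char) (i : Nat) :
    ((PySem.List.slice cs (some (i : Int)) (some ((i : Int) + (ts.length : Int))) == ts)
      && (((i : Int) == 0) || !(pvIsWordB (PySem.List.pyGetD cs ((i : Int) - 1) ' ')))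
      && (((i : Int) + (ts.length : Int) == (cs.length : Int)) || !(pvIsWordB (PySem.List.pyGetD cs ((i : Int) + (ts.length : Int)) ' '))))
    = pvGood cs ts i := by
  have hslice : PySem.List.slice cs (some (i : Int)) (some ((i : Int) + (ts.length : Int)))
      = (List.drop i cs).take ts.length := by
    rw [show (i : Int) + (ts.length : Int) = ((i + ts.length : Nat) : Int) by push_cast; ring,
      PySem.List.slice_natCast cs i (i + ts.length)]
    congr 1
    omega
  have e1 : (PySem.List.slice cs (some (i : Int)) (some ((i : Int) + (ts.length : Int))) == ts)
      = decide (ts <+: cs.drop i) := by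
    rw [hslice]
    by_cases hp : ts <+: cs.drop i
    · simp only [hp, decide_true, beq_iff_eq]
      exact (List.prefix_iff_eq_take.mp hp).symm
    · simp only [hp, decide_false, beq_eq_false_iff_ne, ne_eq]
      intro he
      exact hp (List.prefix_iff_eq_take.mpr he.symm)
  have e2 : (((i : Int) == 0) || !(pvIsWordB (PySem.List.pyGetD cs ((i : Int) - 1) ' ')))
      = ((i == 0) || !(pvIsWordA (cs.getD (i - 1) ' '))) := by
    by_cases hi : i = 0
    · subst hi; simp
    · have b1 : ((i : Int) == 0) = false := by simp; omega
      have b2 : (i == 0) = false := by simp; omega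
      rw [b1, b2, Bool.false_or, Bool.false_or, pvIsWordB_eq,
        show (i : Int) - 1 = ((i - 1 : Nat) : Int) by omega,
        PySem.List.pyGetD_natCast]
  have e3 : (((i : Int) + (ts.length : Int) == (cs.length : Int)) || !(pvIsWordB (PySem.List.pyGetD cs ((i : Int) + (ts.length : Int)) ' ')))
      = ((i + ts.length == cs.length) || !(pvIsWordA (cs.getD (i + ts.length) ' '))) := by
    have b1 : ((i : Int) + (ts.length : Int) == (cs.length : Int)) = (i + ts.length == cs.length) := by
      by_cases he : i + ts.length = cs.length
      · have hc : ((i : Int) + (ts.length : Int) = (cs.length : Int)) := by omega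
        simp [he, hc]
      · have : ¬ ((i : Int) + (ts.length : Int) = (cs.length : Int)) := by omega
        simp [he, this]
    rw [b1, pvIsWordB_eq,
      show (i : Int) + (ts.length : Int) = ((i + ts.length : Nat) : Int) by push_cast; ring,
      PySem.List.pyGetD_natCast]
  rw [e1, e2, e3, pvGood]

lemma pvB_iff (text token : String) :
    contains_ascii_token_py_alt text token = true ↔
      ∃ i, i + token.toList.length ≤ text.toList.length ∧ pvGood text.toList token.toList i = true := by
  simp only [contains_ascii_token_py_alt, List.any_eq_true]
  constructor
  · rintro ⟨x, hx, hpx⟩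
    rw [PySem.List.mem_pyRange_one] at hx
    refine ⟨x.toNat, by omega, ?_⟩
    rw [show x = ((x.toNat : Nat) : Int) by omega, pvGoodB_eq] at hpx
    exact hpx
  · rintro ⟨i, hi, hpi⟩
    refine ⟨(i : Int), by rw [PySem.List.mem_pyRange_one]; omega, ?_⟩
    rw [pvGoodB_eq]
    exact hpi

-- ===== VERDICT (by name: the statement is the Claim_ definition above) =====
theorem contains_ascii_token_py_spec : Claim_equal_contains_ascii_token_py := by
  intro text token _
  unfold Spec_contains_ascii_token_py
  rw [Bool.eq_iff_iff, pvA_iff, pvB_iff]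
  constructor
  · rintro ⟨i, hi, hg⟩
    exact ⟨i, pvGood_bound hg hi, hg⟩
  · rintro ⟨i, hi, hg⟩
    exact ⟨i, by omega, hg⟩
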